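-- pv_equiv track=rewrite | github.com/SoniDharini/Real-Estate-Investment-Recommender | app.py | choose_item_id_column
-- ===== SOURCE A (Python) =====
-- from typing import Dict, List, Optional, Tuple
--
-- def choose_item_id_column(cols: List[str], excluded: Optional[List[str]] = None) -> Optional[str]:
--     excluded_set = set(excluded or [])
--     priority = [
--         "item_id",
--         "property_id",
--         "listing_id",
--         "listing_url",
--         "url",
--         "product_id",
--         "asset_id",
--         "house_id",
--         "state_id",
--     ]
--     for name in priority:
--         if name in cols and name not in excluded_set:
--             return name
--     for col in cols:
--         if col in excluded_set:
--             continue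
--         if col == "id" or col.endswith("_id"):
--             return col
--     return None
-- ===== SOURCE B (Python) =====
-- def choose_item_id_column(cols, excluded=None):
--     excluded_set = set(excluded or [])
--     priority = [
--         "item_id",
--         "property_id",
--         "listing_id",
--         "listing_url",
--         "url",
--         "product_id",
--         "asset_id",
--         "house_id",
--         "state_id",
--     ]
--     rank = {name: i for i, name in enumerate(priority)}
--     best = None      # (rank, column) with the smallest rank seen
--     fallback = None  # first non-priority id-like column
--     for col in cols:
--         if col in excluded_set:
--             continue
--         r = rank.get(col)
--         if r is not None:
--             if best is None or r < best[0]: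
--                 best = (r, col)
--         elif fallback is None and (col == "id" or col.endswith("_id")):
--             fallback = col
--     return best[1] if best is not None else fallback
-- ===== Notes on version B (the rewrite author's own statement) =====
-- stated objective: alternative
-- what changed: Replaces A's two sequential scans (each priority name probed against cols, then a second scan of cols) by a single pass over cols that tracks the minimum-rank priority hit via a precomputed name-to-rank dict and the first id-like fallback.
import Mathlib
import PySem

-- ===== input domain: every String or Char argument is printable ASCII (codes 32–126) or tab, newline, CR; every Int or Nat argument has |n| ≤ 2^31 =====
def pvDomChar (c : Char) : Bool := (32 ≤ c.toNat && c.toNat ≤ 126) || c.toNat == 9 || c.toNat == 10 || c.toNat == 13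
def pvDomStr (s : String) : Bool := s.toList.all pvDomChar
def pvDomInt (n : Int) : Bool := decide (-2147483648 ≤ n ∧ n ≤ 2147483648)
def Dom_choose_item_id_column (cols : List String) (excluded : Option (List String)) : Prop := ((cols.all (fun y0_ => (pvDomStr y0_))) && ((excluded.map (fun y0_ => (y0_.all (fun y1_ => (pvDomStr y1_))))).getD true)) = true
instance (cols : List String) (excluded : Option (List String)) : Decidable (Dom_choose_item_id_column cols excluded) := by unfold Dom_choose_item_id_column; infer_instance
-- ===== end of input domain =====

-- B replaces A's two sequential scans (the priority list checked against cols, then cols) by a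
-- single pass over cols tracking the minimum-rank priority hit and the first id-like fallback;
-- objective: alternative.

-- ===== PORT A =====
def pvPriority : List String :=
  ["item_id", "property_id", "listing_id", "listing_url", "url",
   "product_id", "asset_id", "house_id", "state_id"]

def choose_item_id_column (cols : List String) (excluded : Option (List String)) : Option String :=
  let excluded_set : PySem.Set String := PySem.Set.ofList (excluded.getD [])
  match pvPriority.find? (fun name => cols.contains name && !(PySem.Set.contains excluded_set name)) with
  | some name => some name
  | none =>
      cols.find? (fun col => !(PySem.Set.contains excluded_set col) &&
        (col == "id" || PySem.Str.endswith col "_id"))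

-- ===== PORT B =====
def pvRankDict : PySem.Dict String Int :=
  (PySem.List.enumerate pvPriority 0).foldl (fun d p => d.insert p.2 p.1) PySem.Dict.empty

def choose_item_id_column_alt (cols : List String) (excluded : Option (List String)) : Option String :=
  let excluded_set : PySem.Set String := PySem.Set.ofList (excluded.getD [])
  let st := cols.foldl
    (fun (st : Option (Int × String) × Option String) col =>
      if PySem.Set.contains excluded_set col then st
      else
        match pvRankDict.get? col with
        | some r =>
            match st.1 with
            | none => (some (r, col), st.2)
            | some b => if r < b.1 then (some (r, col), st.2) else st
        | none =>
            match st.2 with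
            | none =>
                if col == "id" || PySem.Str.endswith col "_id" then (st.1, some col) else st
            | some _ => st)
    (none, none)
  match st.1 with
  | some b => some b.2
  | none => st.2

-- ===== PRECONDITION & SPEC =====
def Spec_choose_item_id_column (cols : List String) (excluded : Option (List String)) (out : Option String) : Prop := out = choose_item_id_column_alt cols excluded
instance (cols : List String) (excluded : Option (List String)) (out : Option String) : Decidable (Spec_choose_item_id_column cols excluded out) := by unfold Spec_choose_item_id_column; infer_instance

-- ===== CLAIM (what is proved, stated in full; the proofs are below) =====
def Claim_equal_choose_item_id_column : Prop := ∀ (cols : List String) (excluded : Option (List String)), Dom_choose_item_id_column cols excluded → Spec_choose_item_id_column cols excluded (choose_item_id_column cols excluded)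

-- ===== LEMMAS AND PROOFS =====

theorem pvRankDict_eq : pvRankDict = PySem.Dict.mk
    [("item_id", 0), ("property_id", 1), ("listing_id", 2), ("listing_url", 3), ("url", 4),
     ("product_id", 5), ("asset_id", 6), ("house_id", 7), ("state_id", 8)] := by decide

-- best-tracking half of B's loop body
def pvStepB (E : List String) (b : Option (Int × String)) (c : String) : Option (Int × String) :=
  if PySem.Set.contains E c then b
  else
    match pvRankDict.get? c with
    | some r =>
        match b with
        | none => some (r, c)
        | some p => if r < p.1 then some (r, c) else b
    | none => b

-- fallback-tracking half of B's loop body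
def pvStepF (E : List String) (f : Option String) (c : String) : Option String :=
  if PySem.Set.contains E c then f
  else
    match pvRankDict.get? c with
    | some _ => f
    | none =>
        match f with
        | none => if c == "id" || PySem.Str.endswith c "_id" then some c else f
        | some _ => f

theorem pvFold_split (E : List String) (cols : List String)
    (b : Option (Int × String)) (f : Option String) :
    cols.foldl
      (fun (st : Option (Int × String) × Option String) col =>
        if PySem.Set.contains E col then st
        else
          match pvRankDict.get? col with
          | some r =>
              match st.1 with
              | none => (some (r, col), st.2)
              | some b => if r < b.1 then (some (r, col), st.2) else st
          | none =>
              match st.2 with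
              | none =>
                  if col == "id" || PySem.Str.endswith col "_id" then (st.1, some col) else st
              | some _ => st)
      (b, f)
    = (cols.foldl (pvStepB E) b, cols.foldl (pvStepF E) f) := by
  induction cols generalizing b f with
  | nil => rfl
  | cons c cs ih =>
    simp only [List.foldl_cons]
    rw [show (if PySem.Set.contains E c then (b, f)
        else
          match pvRankDict.get? c with
          | some r =>
              match (b, f).1 with
              | none => (some (r, c), (b, f).2)
              | some p => if r < p.1 then (some (r, c), (b, f).2) else (b, f)
          | none =>
              match (b, f).2 with
              | none =>
                  if c == "id" || PySem.Str.endswith c "_id" then ((b, f).1, some c) else (b, f)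
              | some _ => (b, f)) = (pvStepB E b c, pvStepF E f c) by
      unfold pvStepB pvStepF
      by_cases hE : c ∈ E <;>
        simp only [hE, PySem.Set.contains, List.elem_eq_contains, List.contains_eq_mem,
          decide_true, decide_false, if_true, if_false, Bool.false_eq_true, ite_true, ite_false] <;>
        cases pvRankDict.get? c <;> cases b <;> cases f <;>
        dsimp only <;> (try split_ifs) <;> rfl]
    exact ih _ _

-- fallback predicate B effectively searches for
def pvQ (E : List String) (c : String) : Bool :=
  !(PySem.Set.contains E c) && (pvRankDict.get? c).isNone &&
    (c == "id" || PySem.Str.endswith c "_id")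

theorem pvStepF_some (E : List String) (v c : String) :
    pvStepF E (some v) c = some v := by
  unfold pvStepF
  by_cases hE : c ∈ E <;> simp [hE] <;> cases pvRankDict.get? c <;> rfl

theorem pvFoldF_some (E : List String) (cols : List String) (v : String) :
    cols.foldl (pvStepF E) (some v) = some v := by
  induction cols with
  | nil => rfl
  | cons c cs ih => rw [List.foldl_cons, pvStepF_some]; exact ih

theorem pvFoldF_none (E : List String) (cols : List String) :
    cols.foldl (pvStepF E) none = cols.find? (pvQ E) := by
  induction cols with
  | nil => rfl
  | cons c cs ih =>
    by_cases hE : c ∈ E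
    · simp [List.foldl_cons, List.find?_cons, pvStepF, pvQ, hE, ih]
    · cases hr : pvRankDict.get? c with
      | some r => simp [List.foldl_cons, List.find?_cons, pvStepF, pvQ, hE, hr, ih]
      | none =>
        by_cases hid : c = "id" ∨ PySem.Chars.endswith c.toList ['_', 'i', 'd'] = true
        · simp [List.foldl_cons, List.find?_cons, pvStepF, pvQ, hE, hr, hid, pvFoldF_some]
        · simp [List.foldl_cons, List.find?_cons, pvStepF, pvQ, hE, hr, hid, ih]

-- what B's best component means: the minimum-rank allowed priority column
def pvBest (E : List String) (cols : List String) (r : Int) (c : String) : Prop :=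
  pvRankDict.get? c = some r ∧ c ∈ cols ∧ c ∉ E ∧
  ∀ c' ∈ cols, c' ∉ E → ∀ r', pvRankDict.get? c' = some r' → r ≤ r'

theorem pvFoldB_char (E : List String) (cols : List String) :
    (cols.foldl (pvStepB E) none = none ∧
      ∀ c ∈ cols, c ∉ E → pvRankDict.get? c = none)
    ∨ (∃ r c, cols.foldl (pvStepB E) none = some (r, c) ∧ pvBest E cols r c) := by
  induction cols using List.reverseRecOn with
  | nil => left; simp
  | append_singleton xs x ih =>
    rw [List.foldl_append, List.foldl_cons, List.foldl_nil]
    rcases ih with ⟨hs, hno⟩ | ⟨r0, c0, hs, hget, hmem, hall, hmin⟩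
    · rw [hs]
      by_cases hE : x ∈ E
      · left
        refine ⟨by simp [pvStepB, hE], ?_⟩
        intro c hc hcE
        rcases List.mem_append.mp hc with h | h
        · exact hno c h hcE
        · simp at h; subst h; exact absurd hE hcE
      · cases hr : pvRankDict.get? x with
        | none =>
          left
          refine ⟨by simp [pvStepB, hE, hr], ?_⟩
          intro c hc hcE
          rcases List.mem_append.mp hc with h | h
          · exact hno c h hcE
          · simp at h; subst h; exact hr
        | some r =>
          right
          refine ⟨r, x, by simp [pvStepB, hE, hr], hr, by simp, hE, ?_⟩
          intro c' hc' hcE r' hr'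
          rcases List.mem_append.mp hc' with h | h
          · rw [hno c' h hcE] at hr'; cases hr'
          · simp at h; subst h; rw [hr] at hr'; injection hr' with h'; omega
    · rw [hs]
      by_cases hE : x ∈ E
      · right
        refine ⟨r0, c0, by simp [pvStepB, hE], hget, List.mem_append_left _ hmem, hall, ?_⟩
        intro c' hc' hcE r' hr'
        rcases List.mem_append.mp hc' with h | h
        · exact hmin c' h hcE r' hr'
        · simp at h; subst h; exact absurd hE hcE
      · cases hr : pvRankDict.get? x with
        | none =>
          right
          refine ⟨r0, c0, by simp [pvStepB, hE, hr], hget, List.mem_append_left _ hmem, hall, ?_⟩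
          intro c' hc' hcE r' hr'
          rcases List.mem_append.mp hc' with h | h
          · exact hmin c' h hcE r' hr'
          · simp at h; subst h; rw [hr] at hr'; cases hr'
        | some r =>
          by_cases hlt : r < r0
          · right
            refine ⟨r, x, by simp [pvStepB, hE, hr, hlt], hr, by simp, hE, ?_⟩
            intro c' hc' hcE r' hr'
            rcases List.mem_append.mp hc' with h | h
            · have := hmin c' h hcE r' hr'; omega
            · simp at h; subst h; rw [hr] at hr'; injection hr' with h'; omega
          · right
            refine ⟨r0, c0, by simp [pvStepB, hE, hr, hlt], hget,
              List.mem_append_left _ hmem, hall, ?_⟩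
            intro c' hc' hcE r' hr'
            rcases List.mem_append.mp hc' with h | h
            · exact hmin c' h hcE r' hr'
            · simp at h; subst h; rw [hr] at hr'; injection hr' with h'; omega

theorem pvRank_isSome_of_mem (n : String) (hn : n ∈ pvPriority) :
    (pvRankDict.get? n).isSome := by
  fin_cases hn <;> decide

theorem pvRank_cases (c : String) (r : Int) (h : pvRankDict.get? c = some r) :
    (c = "item_id" ∧ r = 0) ∨ (c = "property_id" ∧ r = 1) ∨ (c = "listing_id" ∧ r = 2) ∨
    (c = "listing_url" ∧ r = 3) ∨ (c = "url" ∧ r = 4) ∨ (c = "product_id" ∧ r = 5) ∨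
    (c = "asset_id" ∧ r = 6) ∨ (c = "house_id" ∧ r = 7) ∨ (c = "state_id" ∧ r = 8) := by
  rw [pvRankDict_eq] at h
  rw [PySem.Dict.get?_mk_cons] at h
  rw [PySem.Dict.get?_mk_cons] at h
  rw [PySem.Dict.get?_mk_cons] at h
  rw [PySem.Dict.get?_mk_cons] at h
  rw [PySem.Dict.get?_mk_cons] at h
  rw [PySem.Dict.get?_mk_cons] at h
  rw [PySem.Dict.get?_mk_cons] at h
  rw [PySem.Dict.get?_mk_cons] at h
  rw [PySem.Dict.get?_mk_cons] at h
  split_ifs at h with h1 h2 h3 h4 h5 h6 h7 h8 h9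
  · exact Or.inl ⟨(beq_iff_eq.mp h1).symm, by injection h with h'; omega⟩
  · exact Or.inr (Or.inl ⟨(beq_iff_eq.mp h2).symm, by injection h with h'; omega⟩)
  · exact Or.inr (Or.inr (Or.inl ⟨(beq_iff_eq.mp h3).symm, by injection h with h'; omega⟩))
  · exact Or.inr (Or.inr (Or.inr (Or.inl ⟨(beq_iff_eq.mp h4).symm, by injection h with h'; omega⟩)))
  · exact Or.inr (Or.inr (Or.inr (Or.inr (Or.inl ⟨(beq_iff_eq.mp h5).symm, by injection h with h'; omega⟩))))
  · exact Or.inr (Or.inr (Or.inr (Or.inr (Or.inr (Or.inl ⟨(beq_iff_eq.mp h6).symm, by injection h with h'; omega⟩)))))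
  · exact Or.inr (Or.inr (Or.inr (Or.inr (Or.inr (Or.inr (Or.inl ⟨(beq_iff_eq.mp h7).symm, by injection h with h'; omega⟩))))))
  · exact Or.inr (Or.inr (Or.inr (Or.inr (Or.inr (Or.inr (Or.inr (Or.inl ⟨(beq_iff_eq.mp h8).symm, by injection h with h'; omega⟩)))))))
  · exact Or.inr (Or.inr (Or.inr (Or.inr (Or.inr (Or.inr (Or.inr (Or.inr ⟨(beq_iff_eq.mp h9).symm, by injection h with h'; omega⟩)))))))
  · cases h

theorem pvFind?_congr {α : Type} (p q : α → Bool) (l : List α)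
    (h : ∀ a ∈ l, p a = q a) : l.find? p = l.find? q := by
  induction l with
  | nil => rfl
  | cons a l ih =>
    rw [List.find?_cons, List.find?_cons, h a (by simp),
      ih (fun a ha => h a (by simp [ha]))]

-- ===== VERDICT (by name: the statement is the Claim_ definition above) =====
theorem choose_item_id_column_spec : Claim_equal_choose_item_id_column := by
  unfold Claim_equal_choose_item_id_column Spec_choose_item_id_column
  intro cols excluded _
  simp only [choose_item_id_column, choose_item_id_column_alt]
  rw [pvFold_split]
  set E := PySem.Set.ofList (excluded.getD []) with hEdef
  rcases pvFoldB_char E cols with ⟨hB, hno⟩ | ⟨r, c, hB, hget, hmem, hall, hmin⟩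
  · rw [hB]
    have hPn : pvPriority.find?
        (fun name => cols.contains name && !(PySem.Set.contains E name)) = none := by
      rw [List.find?_eq_none]
      intro n hn hp
      simp only [Bool.and_eq_true, Bool.not_eq_true', PySem.Set.contains,
        List.elem_eq_contains, List.contains_eq_mem, decide_eq_true_eq,
        decide_eq_false_iff_not] at hp
      have h1 := hno n hp.1 hp.2
      have h2 := pvRank_isSome_of_mem n hn
      rw [h1] at h2; cases h2
    rw [hPn, pvFoldF_none]
    exact (pvFind?_congr _ _ cols (fun a ha => by
      unfold pvQ
      by_cases hE : a ∈ E
      · simp [hE]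
      · simp [hE, hno a ha hE])).symm
  · rw [hB]
    have hfalse : ∀ n j, pvRankDict.get? n = some j → j < r → ¬(n ∈ cols ∧ n ∉ E) := by
      intro n j hjn hjr h
      have := hmin n h.1 h.2 j hjn
      omega
    rcases pvRank_cases c r hget with ⟨hc, hrr⟩ | ⟨hc, hrr⟩ | ⟨hc, hrr⟩ | ⟨hc, hrr⟩ |
      ⟨hc, hrr⟩ | ⟨hc, hrr⟩ | ⟨hc, hrr⟩ | ⟨hc, hrr⟩ | ⟨hc, hrr⟩ <;> subst hc <;> subst hrr
    · simp [pvPriority, List.find?_cons, hmem, hall]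
    · simp [pvPriority, List.find?_cons, hmem, hall, hfalse "item_id" 0 (by decide) (by decide)]
    · simp [pvPriority, List.find?_cons, hmem, hall, hfalse "item_id" 0 (by decide) (by decide), hfalse "property_id" 1 (by decide) (by decide)]
    · simp [pvPriority, List.find?_cons, hmem, hall, hfalse "item_id" 0 (by decide) (by decide), hfalse "property_id" 1 (by decide) (by decide), hfalse "listing_id" 2 (by decide) (by decide)]
    · simp [pvPriority, List.find?_cons, hmem, hall, hfalse "item_id" 0 (by decide) (by decide), hfalse "property_id" 1 (by decide) (by decide), hfalse "listing_id" 2 (by decide) (by decide), hfalse "listing_url" 3 (by decide) (by decide)]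
    · simp [pvPriority, List.find?_cons, hmem, hall, hfalse "item_id" 0 (by decide) (by decide), hfalse "property_id" 1 (by decide) (by decide), hfalse "listing_id" 2 (by decide) (by decide), hfalse "listing_url" 3 (by decide) (by decide), hfalse "url" 4 (by decide) (by decide)]
    · simp [pvPriority, List.find?_cons, hmem, hall, hfalse "item_id" 0 (by decide) (by decide), hfalse "property_id" 1 (by decide) (by decide), hfalse "listing_id" 2 (by decide) (by decide), hfalse "listing_url" 3 (by decide) (by decide), hfalse "url" 4 (by decide) (by decide), hfalse "product_id" 5 (by decide) (by decide)]
    · simp [pvPriority, List.find?_cons, hmem, hall, hfalse "item_id" 0 (by decide) (by decide), hfalse "property_id" 1 (by decide) (by decide), hfalse "listing_id" 2 (by decide) (by decide), hfalse "listing_url" 3 (by decide) (by decide), hfalse "url" 4 (by decide) (by decide), hfalse "product_id" 5 (by decide) (by decide), hfalse "asset_id" 6 (by decide) (by decide)]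
    · simp [pvPriority, List.find?_cons, hmem, hall, hfalse "item_id" 0 (by decide) (by decide), hfalse "property_id" 1 (by decide) (by decide), hfalse "listing_id" 2 (by decide) (by decide), hfalse "listing_url" 3 (by decide) (by decide), hfalse "url" 4 (by decide) (by decide), hfalse "product_id" 5 (by decide) (by decide), hfalse "asset_id" 6 (by decide) (by decide), hfalse "house_id" 7 (by decide) (by decide)]
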